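-- pv_equiv track=rewrite | github.com/Bodomit/Houshou | houshou/data/base.py | get_indexes
-- ===== SOURCE A (Python) =====
-- from typing import List, Optional, Set
--
-- def get_indexes(attr_names: List[str], selected_attrs: List[str]):
--     indexs: List[int] = []
--     for selected_attr in selected_attrs:
--         try:
--             indexs.append(attr_names.index(selected_attr))
--         except ValueError:
--             raise ValueError(
--                 f"Selected Attribute {selected_attr}"
--                 + " not in attributes for dataset."
--             )
--     return indexs
-- ===== SOURCE B (Python) =====
-- def get_indexes(attr_names, selected_attrs):
--     # Inverted traversal: group selected positions by name, then one scan over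
--     # attr_names fills the output slots at the first occurrence of each name.
--     wanted = {}
--     for j, s in enumerate(selected_attrs):
--         wanted.setdefault(s, []).append(j)
--     out = [-1] * len(selected_attrs)
--     for i, name in enumerate(attr_names):
--         js = wanted.pop(name, None)
--         if js is not None:
--             for j in js:
--                 out[j] = i
--     if wanted:
--         missing = next(iter(wanted))
--         raise ValueError(
--             f"Selected Attribute {missing}"
--             + " not in attributes for dataset."
--         )
--     return out
-- ===== Notes on version B (the rewrite author's own statement) =====
-- stated objective: alternative
-- what changed: A scans attr_names once per selected attribute (list.index in a loop); B inverts the traversal: it groups the selected positions by name into a dict, then fills the output array in a single scan over attr_names, popping each name at its first occurrence.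
import Mathlib
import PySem

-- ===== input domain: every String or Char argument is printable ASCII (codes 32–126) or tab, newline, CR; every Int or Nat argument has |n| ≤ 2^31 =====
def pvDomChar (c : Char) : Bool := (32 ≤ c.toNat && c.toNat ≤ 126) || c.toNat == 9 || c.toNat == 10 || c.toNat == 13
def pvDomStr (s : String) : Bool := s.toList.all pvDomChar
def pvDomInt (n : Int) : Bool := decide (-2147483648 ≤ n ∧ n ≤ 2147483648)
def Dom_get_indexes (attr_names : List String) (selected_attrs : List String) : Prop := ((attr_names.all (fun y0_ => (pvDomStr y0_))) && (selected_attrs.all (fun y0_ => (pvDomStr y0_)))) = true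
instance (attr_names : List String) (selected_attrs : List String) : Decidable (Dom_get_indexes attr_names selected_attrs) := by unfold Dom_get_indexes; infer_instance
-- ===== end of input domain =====

-- B inverts A's traversal: instead of one linear scan of attr_names per selected attribute, it
-- groups the selected positions by name and fills the output in ONE scan over attr_names
-- (alternative algorithm; the missing-attribute ValueError of both programs is outside Pre_).

-- ===== PORT A =====
-- Port of A: for each selected attr, append attr_names.index(selected_attr);
-- the ValueError branch (selected attr missing) is excluded by Pre_.
def get_indexes (attr_names : List String) (selected_attrs : List String) : List Int :=
  selected_attrs.foldl
    (fun indexs selected_attr =>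
      indexs ++ [(((PySem.List.index? attr_names selected_attr).getD 0 : Nat) : Int)])
    []

-- ===== PORT B =====
-- wanted: name -> list of selected positions, via setdefault(s, []).append(j)  (= Dict.modify)
def pvWanted (selected_attrs : List String) : PySem.Dict String (List Int) :=
  (PySem.List.enumerate selected_attrs 0).foldl
    (fun d p => d.modify p.2 [] (fun l => l ++ [p.1]))
    PySem.Dict.empty

-- one step of B's scan over enumerate(attr_names): js = wanted.pop(name, None); fill out[j] = i.
-- out[j] = i is ported as List.set j.toNat i: the positions j stored in wanted come from
-- enumerate(selected_attrs), so 0 ≤ j < len(out) and the port is exact there.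
def pvStep (st : List Int × PySem.Dict String (List Int)) (p : Int × String) :
    List Int × PySem.Dict String (List Int) :=
  match st.2.pop? p.2 with
  | none => st
  | some (js, d') => (js.foldl (fun o j => o.set j.toNat p.1) st.1, d')

def get_indexes_alt (attr_names : List String) (selected_attrs : List String) : List Int :=
  ((PySem.List.enumerate attr_names 0).foldl pvStep
    (List.replicate selected_attrs.length (-1 : Int), pvWanted selected_attrs)).1

-- ===== PRECONDITION & SPEC =====
-- Pre_: every selected attribute occurs in attr_names; otherwise Python A raises ValueError.
def Pre_get_indexes (attr_names : List String) (selected_attrs : List String) : Prop :=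
  ∀ s ∈ selected_attrs, s ∈ attr_names
instance (attr_names : List String) (selected_attrs : List String) : Decidable (Pre_get_indexes attr_names selected_attrs) := by unfold Pre_get_indexes; infer_instance
def pvWitness_get_indexes : List String × List String := (["a", "b", "c"], ["c", "a", "c"])

def Spec_get_indexes (attr_names : List String) (selected_attrs : List String) (out : List Int) : Prop := out = get_indexes_alt attr_names selected_attrs
instance (attr_names : List String) (selected_attrs : List String) (out : List Int) : Decidable (Spec_get_indexes attr_names selected_attrs out) := by unfold Spec_get_indexes; infer_instance

-- ===== CLAIM (what is proved, stated in full; the proofs are below) =====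
def Claim_equal_get_indexes : Prop := ∀ (attr_names : List String) (selected_attrs : List String), Dom_get_indexes attr_names selected_attrs → Pre_get_indexes attr_names selected_attrs → Spec_get_indexes attr_names selected_attrs (get_indexes attr_names selected_attrs)

-- ===== LEMMAS AND PROOFS =====

-- the inner fill loop: length, and the value at a position
lemma fill_length (js : List Int) (i : Int) (out : List Int) :
    (js.foldl (fun o j => o.set j.toNat i) out).length = out.length := by
  induction js generalizing out with
  | nil => rfl
  | cons x xs ih => simp [List.foldl_cons, ih, List.length_set]

lemma fill_get_of_not_mem (js : List Int) (i : Int) (out : List Int) (jn : Nat)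
    (h : ∀ x ∈ js, x.toNat ≠ jn) :
    (js.foldl (fun o j => o.set j.toNat i) out)[jn]? = out[jn]? := by
  induction js generalizing out with
  | nil => rfl
  | cons x xs ih =>
    rw [List.foldl_cons, ih _ (fun y hy => h y (by simp [hy])),
        List.getElem?_set_ne (h x (by simp))]

lemma fill_get_of_set (js : List Int) (i : Int) (out : List Int) (jn : Nat)
    (h : out[jn]? = some i) :
    (js.foldl (fun o j => o.set j.toNat i) out)[jn]? = some i := by
  induction js generalizing out with
  | nil => exact h
  | cons x xs ih =>
    rw [List.foldl_cons]
    apply ih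
    rw [List.getElem?_set]
    split_ifs with h1 h2
    · rfl
    · exact absurd (by subst h1; exact (List.getElem?_eq_some_iff.mp h).1) h2
    · exact h

lemma fill_get_of_mem (js : List Int) (i : Int) (out : List Int) (jn : Nat)
    (hj : jn < out.length) (hmem : (jn : Int) ∈ js) :
    (js.foldl (fun o j => o.set j.toNat i) out)[jn]? = some i := by
  induction js generalizing out with
  | nil => simp at hmem
  | cons x xs ih =>
    rw [List.foldl_cons]
    rcases List.mem_cons.mp hmem with hx | hx
    · apply fill_get_of_set
      rw [← hx]
      simp [hj]
    · exact ih _ (by simpa using hj) hx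

-- Dict.erase: the resulting lookups (PySem.Dict.erase is items.filter; not in the lemma book)
lemma get?_erase (d : PySem.Dict String (List Int)) (k k' : String) :
    (d.erase k).get? k' = if k' = k then none else d.get? k' := by
  obtain ⟨items⟩ := d
  simp only [PySem.Dict.erase, PySem.Dict.get?]
  induction items with
  | nil => simp
  | cons p rest ih =>
    by_cases h1 : p.1 = k <;> by_cases h2 : p.1 = k' <;> by_cases h3 : k' = k <;>
      simp_all

lemma getD_erase (d : PySem.Dict String (List Int)) (k k' : String) :
    (d.erase k).getD k' [] = if k' = k then [] else d.getD k' [] := by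
  rw [PySem.Dict.getD_eq_get?_getD, PySem.Dict.getD_eq_get?_getD, get?_erase]
  split_ifs <;> rfl

-- characterisation of the wanted dict: position lists
lemma mem_wanted_getD (selected_attrs : List String) (name : String) (x : Int) :
    x ∈ (pvWanted selected_attrs).getD name [] ↔
      ∃ (k : Nat) (h : k < selected_attrs.length), x = (k : Int) ∧ selected_attrs[k] = name := by
  unfold pvWanted
  rw [show (PySem.List.enumerate selected_attrs 0).foldl
        (fun d p => d.modify p.2 [] (fun l => l ++ [p.1])) PySem.Dict.empty
      = ((PySem.List.enumerate selected_attrs 0).map (fun p => (p.2, p.1))).foldl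
        (fun d q => d.modify q.1 [] (fun l => l ++ [q.2])) PySem.Dict.empty
      from by rw [List.foldl_map]]
  rw [PySem.Dict.getD_foldl_modify_append, PySem.Dict.getD_empty]
  simp only [List.nil_append, List.mem_map, List.mem_filter, List.mem_map]
  constructor
  · rintro ⟨q, ⟨⟨p, hp, rfl⟩, hq⟩, rfl⟩
    obtain ⟨k, hk, rfl⟩ := (PySem.List.mem_enumerate_iff _ _ _).mp hp
    exact ⟨k, hk, by simp, by simpa using hq⟩
  · rintro ⟨k, hk, rfl, hname⟩
    refine ⟨(name, (k : Int)), ⟨⟨((k : Int), name), ?_, rfl⟩, by simp⟩, rfl⟩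
    exact (PySem.List.mem_enumerate_iff _ _ _).mpr ⟨k, hk, by simp [hname]⟩

-- the main scan preserves the output length
lemma loop_length (l : List String) (s : Int) (out : List Int)
    (d : PySem.Dict String (List Int)) :
    (((PySem.List.enumerate l s).foldl pvStep (out, d)).1).length = out.length := by
  induction l generalizing s out d with
  | nil => rfl
  | cons x xs ih =>
    rw [PySem.List.enumerate_cons, List.foldl_cons]
    cases h : (out, d).2.pop? x with
    | none => rw [show pvStep (out, d) (s, x) = (out, d) from by simp [pvStep, h]]; exact ih ..
    | some r =>
      rw [show pvStep (out, d) (s, x)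
            = (r.1.foldl (fun o j => o.set j.toNat s) out, r.2) from by simp [pvStep, h]]
      rw [ih, fill_length]

-- the scan leaves untouched every position no dict entry mentions
lemma loop_get_none (l : List String) (s : Int) (out : List Int)
    (d : PySem.Dict String (List Int)) (jn : Nat)
    (hnone : ∀ name, (jn : Int) ∉ d.getD name [])
    (hnn : ∀ name y, y ∈ d.getD name [] → 0 ≤ y) :
    (((PySem.List.enumerate l s).foldl pvStep (out, d)).1)[jn]? = out[jn]? := by
  induction l generalizing s out d with
  | nil => rfl
  | cons x xs ih =>
    rw [PySem.List.enumerate_cons, List.foldl_cons]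
    cases h : (out, d).2.pop? x with
    | none =>
      rw [show pvStep (out, d) (s, x) = (out, d) from by simp [pvStep, h]]
      exact ih _ _ _ hnone hnn
    | some r =>
      simp only [PySem.Dict.pop?, Option.map_eq_some_iff] at h
      obtain ⟨js, hget, hr⟩ := h
      rw [show pvStep (out, d) (s, x)
            = (js.foldl (fun o j => o.set j.toNat s) out, d.erase x) from by
          simp [pvStep, PySem.Dict.pop?, hget]]
      have hjs : js = d.getD x [] := (PySem.Dict.getD_of_get?_eq_some d [] hget).symm
      have hA : ∀ name, (jn : Int) ∉ (d.erase x).getD name [] := by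
        intro name
        rw [getD_erase]
        split_ifs with hh
        · simp
        · exact hnone name
      have hB : ∀ name y, y ∈ (d.erase x).getD name [] → 0 ≤ y := by
        intro name y hy
        rw [getD_erase] at hy
        split_ifs at hy with hh
        · simp at hy
        · exact hnn name y hy
      rw [ih _ _ _ hA hB]
      exact fill_get_of_not_mem _ _ _ _ (fun y hy => by
        have hy' : y ∈ d.getD x [] := hjs ▸ hy
        have h0 : 0 ≤ y := hnn x y hy'
        have : y ≠ (jn : Int) := fun he => hnone x (he ▸ hy')
        omega)

-- the scan writes s + (first index of nm in l) at every position whose name is nm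
lemma loop_get_mem (l : List String) (s : Int) (out : List Int)
    (d : PySem.Dict String (List Int)) (jn : Nat) (nm : String)
    (hj : jn < out.length)
    (hmem : (jn : Int) ∈ d.getD nm [])
    (huniq : ∀ name, name ≠ nm → (jn : Int) ∉ d.getD name [])
    (hnn : ∀ name y, y ∈ d.getD name [] → 0 ≤ y) :
    (((PySem.List.enumerate l s).foldl pvStep (out, d)).1)[jn]? =
      (match PySem.List.index? l nm with
       | some k => some (s + (k : Int))
       | none => out[jn]?) := by
  induction l generalizing s out d with
  | nil => simp [PySem.List.index?]
  | cons x xs ih =>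
    rw [PySem.List.enumerate_cons, List.foldl_cons]
    by_cases hx : x = nm
    · subst hx
      cases hget : d.get? x with
      | none =>
        exact absurd hmem (by rw [PySem.Dict.getD_eq_get?_getD, hget]; simp)
      | some js =>
        have hjs : js = d.getD x [] := (PySem.Dict.getD_of_get?_eq_some d [] hget).symm
        rw [show pvStep (out, d) (s, x)
              = (js.foldl (fun o j => o.set j.toNat s) out, d.erase x) from by
            simp [pvStep, PySem.Dict.pop?, hget]]
        rw [PySem.List.index?_cons_self]
        have hA : ∀ name, (jn : Int) ∉ (d.erase x).getD name [] := by
          intro name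
          rw [getD_erase]
          split_ifs with hh
          · simp
          · exact huniq name hh
        have hB : ∀ name y, y ∈ (d.erase x).getD name [] → 0 ≤ y := by
          intro name y hy
          rw [getD_erase] at hy
          split_ifs at hy with hh
          · simp at hy
          · exact hnn name y hy
        rw [loop_get_none _ _ _ _ _ hA hB]
        rw [fill_get_of_mem _ _ _ _ hj (hjs ▸ hmem)]
        simp
    · cases hget : d.get? x with
      | none =>
        rw [show pvStep (out, d) (s, x) = (out, d) from by
            simp [pvStep, PySem.Dict.pop?, hget]]
        rw [ih _ _ _ hj hmem huniq hnn, PySem.List.index?_cons_of_ne xs hx]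
        cases PySem.List.index? xs nm <;> simp <;> ring
      | some js =>
        have hjs : js = d.getD x [] := (PySem.Dict.getD_of_get?_eq_some d [] hget).symm
        rw [show pvStep (out, d) (s, x)
              = (js.foldl (fun o j => o.set j.toNat s) out, d.erase x) from by
            simp [pvStep, PySem.Dict.pop?, hget]]
        have hnotin : (jn : Int) ∉ js := hjs ▸ huniq x hx
        have hfill : (js.foldl (fun o j => o.set j.toNat s) out)[jn]? = out[jn]? :=
          fill_get_of_not_mem _ _ _ _ (fun y hy => by
            have h0 : 0 ≤ y := hnn x y (hjs ▸ hy)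
            have : y ≠ (jn : Int) := fun he => hnotin (he ▸ hy)
            omega)
        have hmem' : (jn : Int) ∈ (d.erase x).getD nm [] := by
          rw [getD_erase, if_neg (fun h => hx h.symm)]
          exact hmem
        have hA : ∀ name, name ≠ nm → (jn : Int) ∉ (d.erase x).getD name [] := by
          intro name hne
          rw [getD_erase]
          split_ifs with hh
          · simp
          · exact huniq name hne
        have hB : ∀ name y, y ∈ (d.erase x).getD name [] → 0 ≤ y := by
          intro name y hy
          rw [getD_erase] at hy
          split_ifs at hy with hh
          · simp at hy
          · exact hnn name y hy
        rw [ih _ _ _ (by rw [fill_length]; exact hj) hmem' hA hB]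
        rw [PySem.List.index?_cons_of_ne xs hx]
        cases PySem.List.index? xs nm with
        | none => simpa using hfill
        | some k => simp; ring

-- ===== VERDICT (by name: the statement is the Claim_ definition above) =====
theorem get_indexes_spec : Claim_equal_get_indexes := by
  intro attr_names sel _ hpre
  unfold Spec_get_indexes get_indexes get_indexes_alt
  rw [PySem.List.foldl_append_singleton_eq_map, List.nil_append]
  apply List.ext_getElem?
  intro jn
  by_cases hj : jn < sel.length
  · have hnn : ∀ name y, y ∈ (pvWanted sel).getD name [] → 0 ≤ y := by
      intro name y hy
      obtain ⟨k, hk, rfl, -⟩ := (mem_wanted_getD sel name y).mp hy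
      positivity
    rw [loop_get_mem _ _ _ _ jn sel[jn] (by simpa using hj)
          ((mem_wanted_getD _ _ _).mpr ⟨jn, hj, rfl, rfl⟩)
          (fun name hne hmem => by
            obtain ⟨k, hk, hkj, hkn⟩ := (mem_wanted_getD _ _ _).mp hmem
            subst hkn
            exact hne (by congr 1; omega))
          hnn]
    obtain ⟨k, hk⟩ : ∃ k, PySem.List.index? attr_names sel[jn] = some k := by
      have := (PySem.List.index?_isSome_iff attr_names sel[jn]).mpr
        (hpre sel[jn] (List.getElem_mem hj))
      exact Option.isSome_iff_exists.mp this
    rw [hk, List.getElem?_map, List.getElem?_eq_getElem hj]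
    rw [PySem.List.index?_eq_idxOf?] at hk
    simp [hk]
  · rw [List.getElem?_eq_none (by simpa using not_lt.mp hj),
        List.getElem?_eq_none (by rw [loop_length, List.length_replicate]; omega)]
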